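-- pv_equiv track=rewrite | github.com/T-Marenk/tiralabra | src/peli/peli.py | katso_ylos_alas
-- ===== SOURCE A (Python) =====
-- def katso_ylos_alas(suunta: str, taulukko: list):
--     """Fuktio, joka katsoo, voiko ruudukkoa liikuttaa ylös tai alas
--
--     Args:
--         suunta: Suunta, johon ruudukon liikkuvuus tarkistetaan
--         taulukko: Peli ruudukko
--
--     Returns:
--         Totuusarvon siitä, voiko ruudukkoa liikuttaa kyseiseen suuntaan
--     """
--
--     totuudet = {1: False, 2:False, 3:False, 4:False}
--     if suunta == "ylos":
--         a = 0
--         b = 4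
--         c = 1
--     elif suunta == "alas":
--         a = 3
--         b = -1
--         c = -1
--     k = 1
--     for j in range(4):
--         edellinen = None
--         for i in range(a,b,c):
--             i = taulukko[i]
--             if i[j] == 0:
--                 totuudet[k] = True
--                 continue
--             elif edellinen == None:
--                 edellinen = i[j]
--                 if totuudet[k]:
--                     return True
--                 continue
--             else:
--                 if i[j] == edellinen:
--                     return True
--                 elif totuudet[k]:
--                     return True
--                 edellinen = i[j]
--         k += 1
--     return False
-- ===== SOURCE B (Python) =====
-- def katso_ylos_alas(suunta: str, taulukko: list):
--     """Movable up/down check: a column moves iff compacting it (non-zeros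
--     slide over zeros) changes it, or two consecutive non-zeros are equal."""
--     if suunta == "ylos":
--         a, b, c = 0, 4, 1
--     elif suunta == "alas":
--         a, b, c = 3, -1, -1
--     for j in range(4):
--         vals = [taulukko[r][j] for r in range(a, b, c)]
--         nz = [v for v in vals if v != 0]
--         if vals != nz + [0] * (len(vals) - len(nz)):
--             return True
--         if any(x == y for x, y in zip(nz, nz[1:])):
--             return True
--     return False
-- ===== Notes on version B (the rewrite author's own statement) =====
-- stated objective: simpler
-- what changed: Replaces A's stateful per-column scan (edellinen/flag dict with four early-return branches) by an extract-and-compact test: build the column, filter its non-zeros, and report movable iff compaction changes the column or two consecutive non-zeros are equal.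
-- outside the precondition, e.g. on katso_ylos_alas('ylos', [[1, 9, 9, 9], [1, 9, 9, 9], [], [9, 8, 7, 6]]): A returns True, B raises IndexError
import Mathlib
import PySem

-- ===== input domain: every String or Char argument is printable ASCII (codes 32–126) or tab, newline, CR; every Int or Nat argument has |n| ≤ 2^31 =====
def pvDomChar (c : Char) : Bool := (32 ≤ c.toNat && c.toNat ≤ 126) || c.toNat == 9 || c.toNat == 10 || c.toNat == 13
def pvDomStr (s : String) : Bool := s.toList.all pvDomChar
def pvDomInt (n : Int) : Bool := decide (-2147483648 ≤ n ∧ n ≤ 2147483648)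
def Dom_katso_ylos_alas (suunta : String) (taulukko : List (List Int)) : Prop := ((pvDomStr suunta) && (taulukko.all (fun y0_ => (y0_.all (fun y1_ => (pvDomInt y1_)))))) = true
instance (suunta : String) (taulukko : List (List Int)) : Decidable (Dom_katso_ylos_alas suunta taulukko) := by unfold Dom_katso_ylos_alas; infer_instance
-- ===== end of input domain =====

-- B (simpler decomposition): per column, extract the scanned values, compact the non-zeros,
-- and test "compaction changes the column OR two consecutive non-zeros are equal",
-- instead of A's stateful flag/edellinen scan. Same return value on Pre_.

-- ===== PORT A =====
-- inner 'for i in range(a,b,c)' loop of A, over the remaining row indices;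
-- state = (edellinen, totuudet[k]); returns True iff A's early 'return True' fires in this column
def kyaScan (taulukko : List (List Int)) (j : Int) (idxs : List Int) (edellinen : Option Int) (flag : Bool) : Bool :=
  match idxs with
  | [] => false
  | i :: rest =>
    let v := (PySem.List.pyGet? ((PySem.List.pyGet? taulukko i).getD []) j).getD 0
    if v == 0 then kyaScan taulukko j rest edellinen true
    else
      match edellinen with
      | none => if flag then true else kyaScan taulukko j rest (some v) flag
      | some e =>
        if v == e then true
        else if flag then true
        else kyaScan taulukko j rest (some v) flag

-- outer 'for j in range(4)' loop of A
def kyaOuter (taulukko : List (List Int)) (idxs : List Int) (js : List Int) : Bool :=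
  match js with
  | [] => false
  | j :: rest => if kyaScan taulukko j idxs none false then true else kyaOuter taulukko idxs rest

def katso_ylos_alas (suunta : String) (taulukko : List (List Int)) : Bool :=
  let abc : Int × Int × Int :=
    if suunta == "ylos" then (0, 4, 1)
    else if suunta == "alas" then (3, -1, -1)
    else (0, 0, 1)  -- Python A raises UnboundLocalError on any other suunta; excluded by Pre_
  kyaOuter taulukko (PySem.List.pyRange abc.1 abc.2.1 abc.2.2) (PySem.List.pyRange 0 4 1)

-- ===== PORT B =====
-- one column of B: vals = scanned column, nz = its non-zeros;
-- movable iff compacting changes the column, or some adjacent pair of nz is equal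
def kyaColB (taulukko : List (List Int)) (rows : List Int) (j : Int) : Bool :=
  let vals := rows.map (fun r => (PySem.List.pyGet? ((PySem.List.pyGet? taulukko r).getD []) j).getD 0)
  let nz := vals.filter (fun v => !(v == 0))
  if vals ≠ nz ++ List.replicate (vals.length - nz.length) 0 then true
  else if (nz.zip nz.tail).any (fun p => p.1 == p.2) then true
  else false

def katso_ylos_alas_alt (suunta : String) (taulukko : List (List Int)) : Bool :=
  let abc : Int × Int × Int :=
    if suunta == "ylos" then (0, 4, 1)
    else if suunta == "alas" then (3, -1, -1)
    else (0, 0, 1)  -- same unreachable fallback (Python B raises UnboundLocalError there too)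
  (PySem.List.pyRange 0 4 1).any (fun j => kyaColB taulukko (PySem.List.pyRange abc.1 abc.2.1 abc.2.2) j)

-- ===== PRECONDITION & SPEC =====
-- Pre_ excludes exactly the inputs where Python A raises: a suunta other than "ylos"/"alas"
-- (UnboundLocalError) and grids whose first four rows are missing or shorter than 4 (IndexError
-- on taulukko[i] / row[j]; A can sometimes early-return before hitting a short row, which this
-- slightly over-excludes, but those rescues depend on A's scan order and are accidental).
def Pre_katso_ylos_alas (suunta : String) (taulukko : List (List Int)) : Prop :=
  (suunta = "ylos" ∨ suunta = "alas") ∧ 4 ≤ taulukko.length ∧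
    ∀ row ∈ taulukko.take 4, 4 ≤ row.length
instance (suunta : String) (taulukko : List (List Int)) : Decidable (Pre_katso_ylos_alas suunta taulukko) := by
  unfold Pre_katso_ylos_alas; infer_instance
def pvWitness_katso_ylos_alas : String × List (List Int) :=
  ("alas", [[2, 0, 0, 0], [2, 0, 0, 0], [0, 4, 0, 0], [0, 4, 0, 1]])
def Spec_katso_ylos_alas (suunta : String) (taulukko : List (List Int)) (out : Bool) : Prop := out = katso_ylos_alas_alt suunta taulukko
instance (suunta : String) (taulukko : List (List Int)) (out : Bool) : Decidable (Spec_katso_ylos_alas suunta taulukko out) := by unfold Spec_katso_ylos_alas; infer_instance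

-- ===== CLAIM (what is proved, stated in full; the proofs are below) =====
def Claim_equal_katso_ylos_alas : Prop := ∀ (suunta : String) (taulukko : List (List Int)), Dom_katso_ylos_alas suunta taulukko → Pre_katso_ylos_alas suunta taulukko → Spec_katso_ylos_alas suunta taulukko (katso_ylos_alas suunta taulukko)

-- ===== LEMMAS AND PROOFS =====

-- A's inner scan, abstracted to the list of scanned values
def kyaValScan : List Int → Option Int → Bool → Bool
  | [], _, _ => false
  | v :: t, ed, flag =>
    if v == 0 then kyaValScan t ed true
    else
      match ed with
      | none => if flag then true else kyaValScan t (some v) flag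
      | some e =>
        if v == e then true
        else if flag then true
        else kyaValScan t (some v) flag

-- "some zero precedes a non-zero"
def kyaZb : List Int → Bool
  | [] => false
  | v :: t => if v == 0 then (t.any (fun x => !(x == 0)) || kyaZb t) else kyaZb t

-- "some adjacent pair is equal"
def kyaAdjC : List Int → Bool
  | [] => false
  | v :: t => (t.head? == some v) || kyaAdjC t

def kyaNz (l : List Int) : List Int := l.filter (fun v => !(v == 0))

def kyaEdMatch (ed : Option Int) (nz : List Int) : Bool :=
  match ed, nz.head? with
  | some e, some v => v == e
  | _, _ => false

theorem kyaScan_eq_valScan (taulukko : List (List Int)) (j : Int) (idxs : List Int)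
    (ed : Option Int) (flag : Bool) :
    kyaScan taulukko j idxs ed flag =
      kyaValScan (idxs.map (fun r => (PySem.List.pyGet? ((PySem.List.pyGet? taulukko r).getD []) j).getD 0)) ed flag := by
  induction idxs generalizing ed flag with
  | nil => rfl
  | cons i rest ih =>
    simp only [kyaScan, kyaValScan, List.map_cons]
    cases ed <;> split_ifs <;> simp_all

theorem kyaValScan_closed (vals : List Int) (ed : Option Int) (flag : Bool) :
    kyaValScan vals ed flag =
      ((flag && vals.any (fun x => !(x == 0))) || kyaEdMatch ed (kyaNz vals)
        || kyaZb vals || kyaAdjC (kyaNz vals)) := by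
  induction vals generalizing ed flag with
  | nil => cases ed <;> simp [kyaValScan, kyaNz, kyaEdMatch, kyaZb, kyaAdjC]
  | cons v t ih =>
    by_cases hv : v = 0
    · subst hv
      have hnzc : kyaNz (0 :: t) = kyaNz t := by simp [kyaNz]
      have hzbc : kyaZb (0 :: t) = (t.any (fun x => !(x == 0)) || kyaZb t) := by simp [kyaZb]
      have hanyc : (0 :: t).any (fun x => !(x == 0)) = t.any (fun x => !(x == 0)) := by
        simp
      simp only [kyaValScan, if_pos (by decide : ((0 : Int) == 0) = true)]
      rw [ih, hnzc, hzbc, hanyc]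
      generalize t.any (fun x => !(x == 0)) = A
      generalize kyaEdMatch ed (kyaNz t) = B
      generalize kyaZb t = C
      generalize kyaAdjC (kyaNz t) = D
      cases flag <;> cases A <;> cases B <;> cases C <;> cases D <;> rfl
    · have hb : (v == 0) = false := by simp [hv]
      have hnzc : kyaNz (v :: t) = v :: kyaNz t := by simp [kyaNz, hb]
      have hzbc : kyaZb (v :: t) = kyaZb t := by simp [kyaZb, hb]
      have hadjc : kyaAdjC (v :: kyaNz t) = (((kyaNz t).head? == some v) || kyaAdjC (kyaNz t)) := rfl
      cases ed with
      | none =>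
        cases flag
        · have hstep : kyaValScan (v :: t) none false = kyaValScan t (some v) false := by
            simp [kyaValScan, hb]
          rw [hstep, ih, hnzc, hzbc, hadjc]
          cases hh : (kyaNz t).head? with
          | none =>
            simp [kyaEdMatch, hh]
          | some w =>
            simp only [kyaEdMatch, hh, Option.some_beq_some,
              Bool.false_and, Bool.false_or]
            generalize (w == v) = A
            generalize kyaZb t = C
            generalize kyaAdjC (kyaNz t) = D
            cases A <;> cases C <;> cases D <;> rfl
        · simp [kyaValScan, hb]
      | some e =>
        by_cases hve : v = e
        · subst hve
          simp [kyaValScan, hb, kyaEdMatch, hnzc]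
        · have hbe : (v == e) = false := by simp [hve]
          cases flag
          · have hstep : kyaValScan (v :: t) (some e) false = kyaValScan t (some v) false := by
              simp [kyaValScan, hb, hbe]
            rw [hstep, ih, hnzc, hzbc, hadjc]
            cases hh : (kyaNz t).head? with
            | none =>
              simp [kyaEdMatch, hh, hbe]
            | some w =>
              simp only [kyaEdMatch, List.head?_cons, hh, hbe, Option.some_beq_some,
                Bool.false_and, Bool.false_or]
              generalize (w == v) = A
              generalize kyaZb t = C
              generalize kyaAdjC (kyaNz t) = D
              cases A <;> cases C <;> cases D <;> rfl
          · simp [kyaValScan, hb, hbe]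

theorem kyaNz_nil_all_zero {t : List Int} (h : kyaNz t = []) :
    t = List.replicate t.length 0 := by
  rw [List.eq_replicate_iff]
  refine ⟨rfl, fun b hb => ?_⟩
  by_contra hb0
  have : b ∈ kyaNz t := by simp [kyaNz, List.mem_filter, hb, hb0]
  simp [h] at this

theorem kyaZb_eq (vals : List Int) :
    kyaZb vals = decide (vals ≠ kyaNz vals ++ List.replicate (vals.length - (kyaNz vals).length) 0) := by
  induction vals with
  | nil => simp [kyaZb, kyaNz]
  | cons v t ih =>
    by_cases hv : v = 0
    · subst hv
      have hnzc : kyaNz (0 :: t) = kyaNz t := by simp [kyaNz]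
      have hzbc : kyaZb (0 :: t) = (t.any (fun x => !(x == 0)) || kyaZb t) := by simp [kyaZb]
      rw [hzbc, hnzc]
      cases hnz : kyaNz t with
      | nil =>
        have ht := kyaNz_nil_all_zero hnz
        have hany : t.any (fun x => !(x == 0)) = false := by
          simp only [List.any_eq_false]
          intro x hx
          have := (List.eq_replicate_iff.mp ht).2 x hx
          simp [this]
        have hzb : kyaZb t = false := by
          rw [ih, hnz]
          simp only [List.nil_append, List.length_nil, Nat.sub_zero, decide_eq_false_iff_not,
            not_not]
          exact ht
        have hrep : (0 : Int) :: t = List.replicate (((0 : Int) :: t).length) 0 := by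
          conv_lhs => rw [ht]
          simp [List.replicate_succ]
        rw [hany, hzb]
        simp only [List.nil_append, List.length_nil, Nat.sub_zero, Bool.or_self]
        symm
        rw [decide_eq_false_iff_not]
        simp only [ne_eq, not_not]
        exact hrep
      | cons w ws =>
        have hwmem : w ∈ kyaNz t := hnz ▸ List.mem_cons_self
        have hw : (w == 0) = false := by
          simpa using (List.mem_filter.mp hwmem).2
        have hany : t.any (fun x => !(x == 0)) = true := by
          refine List.any_eq_true.mpr ⟨w, (List.mem_filter.mp hwmem).1, ?_⟩
          simp [hw]
        have hw0 : ¬ ((0 : Int) = w) := fun h => by rw [← h] at hw; simp at hw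
        rw [hany]
        simp [hw0]
    · have hb : (v == 0) = false := by simp [hv]
      have hnzc : kyaNz (v :: t) = v :: kyaNz t := by simp [kyaNz, hb]
      have hzbc : kyaZb (v :: t) = kyaZb t := by simp [kyaZb, hb]
      rw [hzbc, hnzc, ih]
      have hlen : (kyaNz t).length ≤ t.length := List.length_filter_le _ _
      have hl : (v :: t).length - (v :: kyaNz t).length = t.length - (kyaNz t).length := by
        simp only [List.length_cons]
        omega
      rw [hl, List.cons_append]
      simp

theorem kyaAdjC_eq_zip (l : List Int) :
    kyaAdjC l = (l.zip l.tail).any (fun p => p.1 == p.2) := by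
  induction l with
  | nil => rfl
  | cons v t ih =>
    cases t with
    | nil => simp [kyaAdjC]
    | cons w ws =>
      have hstep : kyaAdjC (v :: w :: ws) = (((w :: ws).head? == some v) || kyaAdjC (w :: ws)) := rfl
      rw [hstep, ih]
      by_cases hvw : v = w
      · subst hvw
        simp
      · have h1 : (w == v) = false := by simp [Ne.symm hvw]
        have h2 : (v == w) = false := by simp [hvw]
        simp [h1, h2]

theorem kyaCol_eq (taulukko : List (List Int)) (rows : List Int) (j : Int) :
    kyaScan taulukko j rows none false = kyaColB taulukko rows j := by
  have he : ∀ l : List Int, kyaEdMatch none l = false := by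
    intro l
    cases l.head? <;> simp [kyaEdMatch]
  rw [kyaScan_eq_valScan, kyaValScan_closed, he, kyaZb_eq, kyaAdjC_eq_zip]
  simp only [Bool.false_and, Bool.false_or, kyaColB, kyaNz, List.length_map]
  split_ifs with hne hadj
  · simp [decide_eq_true hne]
  · simp [decide_eq_false hne, hadj]
  · simp [decide_eq_false hne, hadj]

theorem kyaOuter_eq_any (taulukko : List (List Int)) (rows : List Int) (js : List Int) :
    kyaOuter taulukko rows js = js.any (fun j => kyaColB taulukko rows j) := by
  induction js with
  | nil => rfl
  | cons j rest ih =>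
    simp only [kyaOuter, List.any_cons, kyaCol_eq, ih]
    split_ifs with h <;> simp [h]

-- ===== VERDICT (by name: the statement is the Claim_ definition above) =====
theorem katso_ylos_alas_spec : Claim_equal_katso_ylos_alas := by
  intro suunta taulukko _ _
  unfold Spec_katso_ylos_alas katso_ylos_alas katso_ylos_alas_alt
  exact kyaOuter_eq_any _ _ _
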